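-- pv_equiv track=rewrite | github.com/SaharTec/cs_HW | Programming_language_principles/HW1.py | arange_digits
-- ===== SOURCE A (Python) =====
-- def arange_digits( num ):
--     """bulding 2 string that represent odd and even numbers"""
--     evenstr = ""
--     oddStr= ""
--     """casting the input number into string"""
--     number = str(num)
--     """go trow the number string and sort for even and odd number to the correct string"""
--     for n in number:
--         digit = int(n)
--         if(digit % 2 == 0):
--             evenstr += n
--         else:
--             oddStr += n
--     """build a sorted string whene even numbers are first"""
--     new_num = evenstr + oddStr
--     """casting the string into int"""
--     return int(new_num)
-- ===== SOURCE B (Python) =====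
-- def arange_digits(num):
--     return int(''.join(sorted(str(num), key=lambda c: int(c) % 2)))
-- ===== Notes on version B (the rewrite author's own statement) =====
-- stated objective: idiomatic
-- what changed: Replaces the manual two-accumulator partitioning loop with a single stable sort of the digit characters keyed by parity (0 for even, 1 for odd), whose stability preserves each group's original order.
import Mathlib
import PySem

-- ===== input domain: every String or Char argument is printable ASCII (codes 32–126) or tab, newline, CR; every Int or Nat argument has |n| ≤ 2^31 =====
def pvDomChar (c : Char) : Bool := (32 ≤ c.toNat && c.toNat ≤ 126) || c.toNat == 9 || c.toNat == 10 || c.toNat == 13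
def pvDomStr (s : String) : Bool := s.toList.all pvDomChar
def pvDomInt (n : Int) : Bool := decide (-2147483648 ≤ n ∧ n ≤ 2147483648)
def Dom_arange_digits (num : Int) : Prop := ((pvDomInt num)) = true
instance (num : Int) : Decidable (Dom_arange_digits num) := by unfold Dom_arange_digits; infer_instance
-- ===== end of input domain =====

-- B replaces A's manual even/odd partitioning loop by one stable sort of the digit
-- characters keyed by parity (idiomatic; same result, not claimed faster).


-- ===== PORT A =====
-- int(n) for the one-character string n; `.getD 0` is only reached where int() raises,
-- which Pre_ excludes (str(num) contains '-' iff num < 0).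
def arange_digits (num : Int) : Int :=
  let number := PySem.Int.toChars num
  let p := number.foldl
    (fun (s : List Char × List Char) n =>
      let digit := (PySem.Int.ofChars? [n]).getD 0
      if PySem.Int.mod digit 2 = 0 then (s.1 ++ [n], s.2) else (s.1, s.2 ++ [n]))
    ([], [])
  let new_num := p.1 ++ p.2
  (PySem.Int.ofChars? new_num).getD 0

-- ===== PORT B =====
-- sorted(str(num), key=lambda c: int(c) % 2), joined and cast back with int().
def arange_digits_alt (num : Int) : Int :=
  (PySem.Int.ofChars?
    (PySem.List.sorted (PySem.Int.toChars num)
      (fun c => PySem.Int.mod ((PySem.Int.ofChars? [c]).getD 0) 2) false)).getD 0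

-- ===== PRECONDITION & SPEC =====
-- Pre_ excludes negative inputs, on which Python A raises ValueError (int('-') on the sign character).
def Pre_arange_digits (num : Int) : Prop := 0 ≤ num
instance (num : Int) : Decidable (Pre_arange_digits num) := by unfold Pre_arange_digits; infer_instance
def pvWitness_arange_digits : Int := (271 : Int)

def Spec_arange_digits (num : Int) (out : Int) : Prop := out = arange_digits_alt num
instance (num : Int) (out : Int) : Decidable (Spec_arange_digits num out) := by unfold Spec_arange_digits; infer_instance

-- ===== CLAIM (what is proved, stated in full; the proofs are below) =====
def Claim_equal_arange_digits : Prop := ∀ (num : Int), Dom_arange_digits num → Pre_arange_digits num → Spec_arange_digits num (arange_digits num)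

-- ===== LEMMAS AND PROOFS =====

-- inserting past a prefix none of whose elements x goes before
theorem pv_insertBy_append {α : Type} (before : α → α → Bool) (x : α) (e o : List α)
    (h : ∀ y ∈ e, before x y = false) :
    PySem.List.insertBy before x (e ++ o) = e ++ PySem.List.insertBy before x o := by
  induction e with
  | nil => rfl
  | cons a t ih =>
      have ha : before x a = false := h a (by simp)
      simp [PySem.List.insertBy, ha, ih (fun y hy => h y (by simp [hy]))]

-- a stable sort by a {0,1}-valued key is the stable partition: key-0 elements first
theorem pv_sorted_two_key (key : Char → Int) (hk : ∀ c, key c = 0 ∨ key c = 1) (xs : List Char) :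
    PySem.List.sorted xs key false =
      xs.filter (fun c => decide (key c = 0)) ++ xs.filter (fun c => decide (¬ key c = 0)) := by
  rw [PySem.List.sorted_eq_foldl_insertBy]
  induction xs using List.reverseRecOn with
  | nil => rfl
  | append_singleton ys x ih =>
      rw [List.foldl_append, List.foldl_cons, List.foldl_nil, ih, List.filter_append,
        List.filter_append]
      rcases hk x with h0 | h1
      · have he : ∀ y ∈ ys.filter (fun c => decide (key c = 0)),
            decide (key x < key y) = false := by
          intro y hy
          have : key y = 0 := by simpa using (List.of_mem_filter hy)
          simp [h0, this]
        rw [pv_insertBy_append _ _ _ _ he]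
        have ho : PySem.List.insertBy (fun a b => decide (key a < key b)) x
            (ys.filter (fun c => decide (¬ key c = 0))) =
            x :: ys.filter (fun c => decide (¬ key c = 0)) := by
          cases hfo : ys.filter (fun c => decide (¬ key c = 0)) with
          | nil => rfl
          | cons h t =>
              have hh : h ∈ ys.filter (fun c => decide (¬ key c = 0)) := by
                rw [hfo]; exact List.mem_cons_self
              have : key h = 1 := by
                rcases hk h with h' | h'
                · exact absurd h' (by simpa using (List.of_mem_filter hh))
                · exact h'
              simp [PySem.List.insertBy, h0, this]
        rw [ho]
        simp [h0]
      · have hall : ∀ y ∈ ys.filter (fun c => decide (key c = 0)) ++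
            ys.filter (fun c => decide (¬ key c = 0)), decide (key x < key y) = false := by
          intro y _
          rcases hk y with h' | h' <;> simp [h1, h']
        rw [PySem.List.insertBy_of_forall_not_before _ _ _ hall]
        simp [h1]

-- A's loop over any character list is the pair of parity filters
theorem pv_A_loop (cs : List Char) :
    cs.foldl
      (fun (s : List Char × List Char) n =>
        let digit := (PySem.Int.ofChars? [n]).getD 0
        if PySem.Int.mod digit 2 = 0 then (s.1 ++ [n], s.2) else (s.1, s.2 ++ [n]))
      ([], []) =
    (cs.filter (fun c => decide (PySem.Int.mod ((PySem.Int.ofChars? [c]).getD 0) 2 = 0)),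
     cs.filter (fun c => decide (¬ PySem.Int.mod ((PySem.Int.ofChars? [c]).getD 0) 2 = 0))) := by
  have hcongr := PySem.List.foldl_congr_mem
    (l := cs) (init := (([], []) : List Char × List Char))
    (f := fun (s : List Char × List Char) n =>
      let digit := (PySem.Int.ofChars? [n]).getD 0
      if PySem.Int.mod digit 2 = 0 then (s.1 ++ [n], s.2) else (s.1, s.2 ++ [n]))
    (g := fun (s : List Char × List Char) n =>
      (if PySem.Int.mod ((PySem.Int.ofChars? [n]).getD 0) 2 = 0 then s.1 ++ [n] else s.1,
       if ¬ PySem.Int.mod ((PySem.Int.ofChars? [n]).getD 0) 2 = 0 then s.2 ++ [n] else s.2))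
    (by
      intro acc x _
      dsimp only
      by_cases h : PySem.Int.mod ((PySem.Int.ofChars? [x]).getD 0) 2 = 0
      · rw [if_pos h, if_pos h, if_neg (not_not_intro h)]
      · rw [if_neg h, if_neg h, if_pos h])
  rw [hcongr, PySem.List.foldl_prod_mk
    (f := fun (acc : List Char) (x : Char) =>
      if PySem.Int.mod ((PySem.Int.ofChars? [x]).getD 0) 2 = 0 then acc ++ [x] else acc)
    (g := fun (acc : List Char) (x : Char) =>
      if ¬ PySem.Int.mod ((PySem.Int.ofChars? [x]).getD 0) 2 = 0 then acc ++ [x] else acc)]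
  rw [PySem.List.foldl_append_ite_eq_filter, PySem.List.foldl_append_ite_eq_filter]
  simp only [List.nil_append]

-- ===== VERDICT (by name: the statement is the Claim_ definition above) =====
theorem arange_digits_spec : Claim_equal_arange_digits := by
  intro num _ _
  unfold Spec_arange_digits
  simp only [arange_digits, arange_digits_alt, pv_A_loop]
  have hk : ∀ c : Char, PySem.Int.mod ((PySem.Int.ofChars? [c]).getD 0) 2 = 0 ∨
      PySem.Int.mod ((PySem.Int.ofChars? [c]).getD 0) 2 = 1 := by
    intro c
    have h0 := PySem.Int.mod_nonneg (a := (PySem.Int.ofChars? [c]).getD 0) (b := 2) (by norm_num)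
    have h2 := PySem.Int.mod_lt (a := (PySem.Int.ofChars? [c]).getD 0) (b := 2) (by norm_num)
    omega
  rw [pv_sorted_two_key (fun c => PySem.Int.mod ((PySem.Int.ofChars? [c]).getD 0) 2) hk]
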